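-- pv_equiv track=rewrite | github.com/bxt/Ludus | unilectures.py/src/bxt/unilectures/theoinf/hausaufg04/aufg02.py | DyadicRepresentation
-- ===== SOURCE A (Python) =====
-- def DyadicRepresentation(x):
--     # Liefert eine Liste mit den dyadischen Ziffern von x
--     # z.B. DyadicRepresentation(20) == [1, 2, 1, 2]
--     dya=[];                # Starte mit leerem Wort
--     while (x>0):
--         newX=x//2;         # Division mit Rest
--         if(x%2==0):        # Kein Rest, somit eine 2
--             newX=newX-1    # Die 2 ist zu viel gezaehlt
--             dya=[2]+dya;
--         else:              # Eine 1
--             dya=[1]+dya;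
--         x=newX;
--     return dya;
-- ===== SOURCE B (Python) =====
-- def DyadicRepresentation(x):
--     # Dyadic (bijective base-2) digits via binary expansion of x+1:
--     # bin(x+1) minus '0b' and the leading '1' bit, each bit '0'->1, '1'->2.
--     if x <= 0:
--         return []
--     return [int(c) + 1 for c in bin(x + 1)[3:]]
-- ===== Notes on version B (the rewrite author's own statement) =====
-- stated objective: simpler
-- what changed: Replaces the mod/div-and-prepend while loop by computing the binary expansion of x+1 once (bin(x+1)[3:]) and mapping each remaining bit to its successor in a single comprehension.
import Mathlib
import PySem

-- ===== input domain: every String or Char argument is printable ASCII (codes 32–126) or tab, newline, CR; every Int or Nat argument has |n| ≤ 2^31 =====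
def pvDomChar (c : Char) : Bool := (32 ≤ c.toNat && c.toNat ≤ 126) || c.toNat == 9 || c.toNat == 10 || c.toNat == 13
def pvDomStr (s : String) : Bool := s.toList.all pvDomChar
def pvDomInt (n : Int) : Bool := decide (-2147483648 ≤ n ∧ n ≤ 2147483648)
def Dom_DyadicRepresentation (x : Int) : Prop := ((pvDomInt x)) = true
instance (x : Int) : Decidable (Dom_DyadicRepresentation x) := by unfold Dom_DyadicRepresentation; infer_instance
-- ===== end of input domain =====

-- B replaces A's mod/div-and-prepend while loop by one pass over the binary
-- expansion of x+1 (bin(x+1)[3:]), mapping each remaining bit to its successor (objective: simpler).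

-- ===== PORT A =====
-- the while loop of A: state (x, dya), prepending a digit each iteration
def pvALoop (x : Int) (dya : List Int) : List Int :=
  if 0 < x then
    let newX := PySem.Int.floordiv x 2
    if PySem.Int.mod x 2 = 0 then
      pvALoop (newX - 1) ([2] ++ dya)
    else
      pvALoop newX ([1] ++ dya)
  else dya
  termination_by x.toNat
  decreasing_by
    all_goals
      simp only [PySem.Int.floordiv_eq_ediv_of_pos (a := x) (by omega : (0:Int) < 2)]
      omega

def DyadicRepresentation (x : Int) : List Int := pvALoop x []

-- ===== PORT B =====
-- bin(n): the binary digits of n, most significant first ([] for n = 0);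
-- hand port of Python's bin (exact for n ≥ 1 up to the '0b1' prefix handling below)
def pvBinDigits (n : Nat) : List Nat :=
  if n = 0 then [] else pvBinDigits (n / 2) ++ [n % 2]

-- Source B: if x <= 0: []; else [int(c)+1 for c in bin(x+1)[3:]]
-- bin(x+1)[3:] drops '0b' and the leading '1' bit, i.e. is the tail of the digit list
def DyadicRepresentation_alt (x : Int) : List Int :=
  if x ≤ 0 then []
  else ((pvBinDigits (x + 1).toNat).tail).map (fun b => (b : Int) + 1)

-- ===== PRECONDITION & SPEC =====
def Spec_DyadicRepresentation (x : Int) (out : List Int) : Prop := out = DyadicRepresentation_alt x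
instance (x : Int) (out : List Int) : Decidable (Spec_DyadicRepresentation x out) := by unfold Spec_DyadicRepresentation; infer_instance

-- ===== CLAIM (what is proved, stated in full; the proofs are below) =====
def Claim_equal_DyadicRepresentation : Prop := ∀ (x : Int), Dom_DyadicRepresentation x → Spec_DyadicRepresentation x (DyadicRepresentation x)

-- ===== LEMMAS AND PROOFS =====

theorem pvBinDigits_ne_nil {m : Nat} (hm : m ≠ 0) : pvBinDigits m ≠ [] := by
  rw [pvBinDigits, if_neg hm]
  simp

theorem tail_append_of_ne_nil {α : Type} {l l' : List α} (h : l ≠ []) :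
    (l ++ l').tail = l.tail ++ l' := by
  cases l with
  | nil => exact absurd rfl h
  | cons a t => simp

theorem pvALoop_eq (n : Nat) (dya : List Int) :
    pvALoop (n : Int) dya =
      ((pvBinDigits (n + 1)).tail).map (fun b => (b : Int) + 1) ++ dya := by
  induction n using Nat.strong_induction_on generalizing dya with
  | _ n ih =>
    rcases Nat.eq_zero_or_pos n with h0 | hpos
    · subst h0
      rw [pvALoop, if_neg (by omega)]
      have hz : pvBinDigits 0 = [] := by rw [pvBinDigits, if_pos rfl]
      have h1 : pvBinDigits 1 = [1] := by
        rw [pvBinDigits, if_neg one_ne_zero, show (1:Nat)/2 = 0 from rfl, hz]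
        rfl
      rw [show (0:Nat) + 1 = 1 from rfl, h1]
      rfl
    · rw [pvALoop, if_pos (by exact_mod_cast hpos)]
      have hfd : PySem.Int.floordiv (n : Int) 2 = ((n / 2 : Nat) : Int) := by
        exact_mod_cast PySem.Int.floordiv_natCast n 2
      have hmd : PySem.Int.mod (n : Int) 2 = ((n % 2 : Nat) : Int) := by
        exact_mod_cast PySem.Int.mod_natCast n 2
      simp only [hfd, hmd]
      rcases Nat.even_or_odd n with ⟨m, hm⟩ | ⟨m, hm⟩
      · -- n = 2m, m ≥ 1
        have hm1 : 1 ≤ m := by omega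
        have hdiv : n / 2 = m := by omega
        have hcast : ((n / 2 : Nat) : Int) - 1 = ((m - 1 : Nat) : Int) := by
          rw [hdiv]; omega
        rw [if_pos (by rw [show n % 2 = 0 from by omega]; rfl), hcast,
          ih (m - 1) (by omega)]
        have hb : pvBinDigits (n + 1) = pvBinDigits m ++ [1] := by
          rw [pvBinDigits, if_neg (by omega)]
          congr 1
          · congr 1; omega
          · rw [show (n + 1) % 2 = 1 from by omega]
        rw [hb, tail_append_of_ne_nil (pvBinDigits_ne_nil (by omega)),
          show m - 1 + 1 = m from by omega]
        norm_num
      · -- n = 2m + 1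
        have hdiv : n / 2 = m := by omega
        rw [if_neg (by rw [show n % 2 = 1 from by omega]; decide), hdiv,
          ih m (by omega)]
        have hb : pvBinDigits (n + 1) = pvBinDigits (m + 1) ++ [0] := by
          rw [pvBinDigits, if_neg (by omega)]
          congr 1
          · congr 1; omega
          · rw [show (n + 1) % 2 = 0 from by omega]
        rw [hb, tail_append_of_ne_nil (pvBinDigits_ne_nil (by omega))]
        norm_num

-- ===== VERDICT (by name: the statement is the Claim_ definition above) =====
theorem DyadicRepresentation_spec : Claim_equal_DyadicRepresentation := by
  intro x _
  unfold Spec_DyadicRepresentation DyadicRepresentation DyadicRepresentation_alt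
  by_cases hx : x ≤ 0
  · rw [if_pos hx, pvALoop, if_neg (by omega)]
  · rw [if_neg hx]
    have hx' : x = ((x.toNat : Nat) : Int) := by omega
    rw [hx', pvALoop_eq, show (((x.toNat : Nat) : Int) + 1).toNat = x.toNat + 1 from by omega,
      List.append_nil]
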